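-- pv_equiv track=rewrite | github.com/rivienne8/embroidery-python | embroidery.py | draw_triangle
-- ===== SOURCE A (Python) =====
-- def draw_triangle(height,border_color = 1,fill_color = 1,border_width=1):
--     matrix = []
--     width = height*2-1
--
--     # middle = [width // 2+1]
--     middle = [width //2] # //2 a nie //2+1  bo zaczynamy indeksowanie od 0 w width
--     k = 1
--     for i in range(0,height):
--         row = []
--         for j in range(0,width):
--             if i <border_width or i >= height - border_width:
--                 if j in middle :
--                     row.append(border_color)
--                 else:
--                     row.append(0)
--             else:
--                 if j in middle:
--                     if j== min(middle) or j == max(middle):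
--                         row.append(border_color)
--                     else:
--                         row.append(fill_color)
--                 else:
--                     row.append(0)
--
--
--         middle += [middle[0] + k, middle[0] -k]
--         k += 1
--         matrix.append(row)
--
--
--
--     return matrix
-- ===== SOURCE B (Python) =====
-- def draw_triangle(height, border_color=1, fill_color=1, border_width=1):
--     # Row i lights exactly the span [c-i, c+i] around the centre column c = height-1,
--     # so each row is built directly from three run-length blocks; no 'middle' list, no scans.
--     width = height * 2 - 1
--     c = width // 2
--     matrix = []
--     for i in range(height):
--         zeros = [0] * (c - i)
--         if i < border_width or i >= height - border_width:
--             mid = [border_color] * (2 * i + 1)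
--         elif i == 0:
--             mid = [border_color]
--         else:
--             mid = [border_color] + [fill_color] * (2 * i - 1) + [border_color]
--         matrix.append(zeros + mid + zeros)
--     return matrix
-- ===== Notes on version B (the rewrite author's own statement) =====
-- stated objective: faster
-- what changed: B drops A's ever-growing 'middle' list (per-cell membership scan plus min/max scans) and computes each cell from the closed-form span [c-i, c+i] around the centre column.
import Mathlib
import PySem

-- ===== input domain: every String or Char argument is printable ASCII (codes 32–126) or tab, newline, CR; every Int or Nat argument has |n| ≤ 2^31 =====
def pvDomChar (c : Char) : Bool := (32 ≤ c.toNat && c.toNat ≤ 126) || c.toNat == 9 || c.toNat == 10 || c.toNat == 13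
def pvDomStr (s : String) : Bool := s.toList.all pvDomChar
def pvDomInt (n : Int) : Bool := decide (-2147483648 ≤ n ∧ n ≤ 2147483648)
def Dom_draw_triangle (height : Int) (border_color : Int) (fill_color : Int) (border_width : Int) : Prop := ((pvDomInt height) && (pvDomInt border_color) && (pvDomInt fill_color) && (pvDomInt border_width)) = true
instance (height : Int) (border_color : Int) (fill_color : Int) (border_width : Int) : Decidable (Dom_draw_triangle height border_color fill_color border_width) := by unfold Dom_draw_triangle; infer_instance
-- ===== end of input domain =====

-- B replaces A's growing `middle` list (membership scan + min/max scans per cell) by a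
-- closed-form per-cell rule on the span [c-i, c+i]; objective: faster (asymptotic).

-- ===== PORT A =====
-- one iteration of A's inner `for j` loop (row.append under the branch tree)
def pvA_innerStep (height border_color fill_color border_width : Int) (i : Int)
    (middle : List Int) (row : List Int) (j : Int) : List Int :=
  if i < border_width ∨ i ≥ height - border_width then
    if j ∈ middle then row ++ [border_color] else row ++ [0]
  else
    if j ∈ middle then
      if j = (PySem.List.min? middle (fun y => y)).getD 0 ∨
         j = (PySem.List.max? middle (fun y => y)).getD 0 then
        row ++ [border_color]
      else row ++ [fill_color]
    else row ++ [0]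

-- A's inner loop: row = []; for j in range(0, width): …
def pvA_row (height border_color fill_color border_width : Int) (i : Int)
    (middle : List Int) : List Int :=
  (PySem.List.pyRange 0 (height * 2 - 1) 1).foldl
    (pvA_innerStep height border_color fill_color border_width i middle) []

-- one iteration of A's outer `for i` loop over the state (matrix, middle, k)
def pvA_outerStep (height border_color fill_color border_width : Int)
    (st : List (List Int) × List Int × Int) (i : Int) : List (List Int) × List Int × Int :=
  let (matrix, middle, k) := st
  let row := pvA_row height border_color fill_color border_width i middle
  (matrix ++ [row], middle ++ [middle.headD 0 + k, middle.headD 0 - k], k + 1)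

def draw_triangle (height : Int) (border_color : Int) (fill_color : Int) (border_width : Int) : List (List Int) :=
  let width := height * 2 - 1
  let middle : List Int := [PySem.Int.floordiv width 2]
  ((PySem.List.pyRange 0 height 1).foldl
    (pvA_outerStep height border_color fill_color border_width)
    (([] : List (List Int)), middle, (1 : Int))).1

-- ===== PORT B =====
-- one row of Source B: three run-length blocks zeros ++ mid ++ zeros
def pvB_row (height border_color fill_color border_width c : Int) (i : Int) : List Int :=
  let zeros := List.replicate (c - i).toNat (0 : Int)
  let mid :=
    if i < border_width ∨ i ≥ height - border_width then
      List.replicate (2 * i + 1).toNat border_color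
    else if i = 0 then [border_color]
    else [border_color] ++ List.replicate (2 * i - 1).toNat fill_color ++ [border_color]
  zeros ++ mid ++ zeros

def draw_triangle_alt (height : Int) (border_color : Int) (fill_color : Int) (border_width : Int) : List (List Int) :=
  let width := height * 2 - 1
  let c := PySem.Int.floordiv width 2
  (PySem.List.pyRange 0 height 1).map (pvB_row height border_color fill_color border_width c)

-- ===== PRECONDITION & SPEC =====
def Spec_draw_triangle (height : Int) (border_color : Int) (fill_color : Int) (border_width : Int) (out : List (List Int)) : Prop := out = draw_triangle_alt height border_color fill_color border_width
instance (height : Int) (border_color : Int) (fill_color : Int) (border_width : Int) (out : List (List Int)) : Decidable (Spec_draw_triangle height border_color fill_color border_width out) := by unfold Spec_draw_triangle; infer_instance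

-- ===== CLAIM (what is proved, stated in full; the proofs are below) =====
def Claim_equal_draw_triangle : Prop := ∀ (height : Int) (border_color : Int) (fill_color : Int) (border_width : Int), Dom_draw_triangle height border_color fill_color border_width → Spec_draw_triangle height border_color fill_color border_width (draw_triangle height border_color fill_color border_width)

-- ===== LEMMAS AND PROOFS =====

-- per-cell value of A's row i (proof intermediary between the two ports)
def pvCell (height border_color fill_color border_width c : Int) (i j : Int) : Int :=
  let lo := c - i
  let hi := c + i
  if j < lo ∨ j > hi then 0
  else if i < border_width ∨ i ≥ height - border_width then border_color
  else if j = lo ∨ j = hi then border_color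
  else fill_color


-- A's `middle` list after n outer iterations (c is the centre column)
def pvMid (c : Int) : Nat → List Int
  | 0 => [c]
  | n + 1 => pvMid c n ++ [c + (n + 1), c - (n + 1)]

theorem pvMid_cons (c : Int) (n : Nat) : ∃ t, pvMid c n = c :: t := by
  induction n with
  | zero => exact ⟨[], rfl⟩
  | succ n ih =>
    obtain ⟨t, ht⟩ := ih
    exact ⟨t ++ [c + (n + 1), c - (n + 1)], by simp [pvMid, ht]⟩

theorem pvMid_mem (c x : Int) (n : Nat) : x ∈ pvMid c n ↔ c - n ≤ x ∧ x ≤ c + n := by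
  induction n with
  | zero => simp [pvMid]; omega
  | succ n ih =>
    have hc : ((n + 1 : Nat) : Int) = (n : Int) + 1 := by push_cast; ring
    simp only [pvMid, List.mem_append, List.mem_cons, List.not_mem_nil, or_false, ih, hc]
    omega

theorem pvMid_ne_nil (c : Int) (n : Nat) : pvMid c n ≠ [] := by
  obtain ⟨t, ht⟩ := pvMid_cons c n
  simp [ht]

theorem pvMid_headD (c : Int) (n : Nat) : (pvMid c n).headD 0 = c := by
  obtain ⟨t, ht⟩ := pvMid_cons c n
  simp [ht]

theorem pvMid_min (c : Int) (n : Nat) :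
    (PySem.List.min? (pvMid c n) (fun y => y)).getD 0 = c - n := by
  cases h : PySem.List.min? (pvMid c n) (fun y => y) with
  | none => exact absurd ((PySem.List.min?_eq_none_iff _ _).mp h) (pvMid_ne_nil c n)
  | some m =>
    have hmem : m ∈ pvMid c n := PySem.List.min?_mem h
    have h1 : c - n ≤ m := ((pvMid_mem c m n).mp hmem).1
    have h2 : m ≤ c - n :=
      PySem.List.min?_isMin h (c - n) ((pvMid_mem c (c - n) n).mpr (by omega))
    simp [Option.getD]
    omega

theorem pvMid_max (c : Int) (n : Nat) :
    (PySem.List.max? (pvMid c n) (fun y => y)).getD 0 = c + n := by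
  cases h : PySem.List.max? (pvMid c n) (fun y => y) with
  | none => exact absurd ((PySem.List.max?_eq_none_iff _ _).mp h) (pvMid_ne_nil c n)
  | some m =>
    have hmem : m ∈ pvMid c n := PySem.List.max?_mem h
    have h1 : m ≤ c + n := ((pvMid_mem c m n).mp hmem).2
    have h2 : c + n ≤ m :=
      PySem.List.max?_isMax h (c + n) ((pvMid_mem c (c + n) n).mpr (by omega))
    simp [Option.getD]
    omega

theorem pv_innerStep_eq (height border_color fill_color border_width c : Int) (m : Nat)
    (row : List Int) (j : Int) :
    pvA_innerStep height border_color fill_color border_width (m : Int) (pvMid c m) row j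
      = row ++ [pvCell height border_color fill_color border_width c (m : Int) j] := by
  have hmem := pvMid_mem c j m
  have hmin := pvMid_min c m
  have hmax := pvMid_max c m
  unfold pvA_innerStep pvCell
  split_ifs <;> simp_all

theorem pv_row_eq (height border_color fill_color border_width c : Int) (m : Nat) :
    pvA_row height border_color fill_color border_width (m : Int) (pvMid c m)
      = (PySem.List.pyRange 0 (height * 2 - 1) 1).map
          (pvCell height border_color fill_color border_width c (m : Int)) := by
  unfold pvA_row
  rw [show pvA_innerStep height border_color fill_color border_width (m : Int) (pvMid c m)
        = fun row j => row ++ [pvCell height border_color fill_color border_width c (m : Int) j]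
      from funext fun row => funext fun j =>
        pv_innerStep_eq height border_color fill_color border_width c m row j]
  rw [PySem.List.foldl_append_singleton_eq_map]
  simp

theorem pv_outer_eq (height border_color fill_color border_width c : Int) (n : Nat) :
    (PySem.List.pyRange 0 (n : Int) 1).foldl
      (pvA_outerStep height border_color fill_color border_width)
      (([] : List (List Int)), [c], (1 : Int))
    = ((PySem.List.pyRange 0 (n : Int) 1).map (fun i =>
         pvA_row height border_color fill_color border_width i (pvMid c i.toNat)),
       pvMid c n, (n : Int) + 1) := by
  induction n with
  | zero => simp [PySem.List.pyRange_one_eq_nil, pvMid]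
  | succ n ih =>
    have hcast : ((n + 1 : Nat) : Int) = (n : Int) + 1 := by push_cast; ring
    rw [hcast, PySem.List.pyRange_one_succ_right (by positivity), List.foldl_append,
        List.map_append, ih]
    simp only [List.foldl_cons, List.foldl_nil, pvA_outerStep, List.map_cons, List.map_nil,
      pvMid_headD, Int.toNat_natCast]
    refine Prod.ext rfl (Prod.ext ?_ ?_)
    · show pvMid c n ++ [c + ((n : Int) + 1), c - ((n : Int) + 1)] = pvMid c (n + 1)
      simp [pvMid]
    · push_cast; ring

theorem pv_c_eq (h : Int) : PySem.Int.floordiv (h * 2 - 1) 2 = h - 1 := by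
  rw [PySem.Int.floordiv_eq_ediv_of_pos (by norm_num)]
  omega

theorem pv_map_const (a b v : Int) (f : Int → Int)
    (hf : ∀ x, a ≤ x → x < b → f x = v) :
    (PySem.List.pyRange a b 1).map f = List.replicate (b - a).toNat v := by
  rw [PySem.List.pyRange_one, List.map_map]
  refine List.eq_replicate_iff.mpr ⟨by simp, ?_⟩
  intro y hy
  simp only [List.mem_map, List.mem_range, Function.comp] at hy
  obtain ⟨k, hk, rfl⟩ := hy
  exact hf _ (by omega) (by omega)

theorem pv_cell_row (height border_color fill_color border_width c : Int) (m : Nat)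
    (hc : c = height - 1) (hm : (m : Int) < height) :
    (PySem.List.pyRange 0 (height * 2 - 1) 1).map
        (pvCell height border_color fill_color border_width c (m : Int))
      = pvB_row height border_color fill_color border_width c (m : Int) := by
  have h0i : (0 : Int) ≤ (m : Int) := by positivity
  rw [PySem.List.pyRange_one_append 0 (c - (m : Int)) (height * 2 - 1) (by omega) (by omega),
      PySem.List.pyRange_one_append (c - (m : Int)) (c + (m : Int) + 1) (height * 2 - 1)
        (by omega) (by omega), List.map_append, List.map_append]
  have hz1 : (PySem.List.pyRange 0 (c - (m : Int)) 1).map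
      (pvCell height border_color fill_color border_width c (m : Int))
      = List.replicate (c - (m : Int)).toNat (0 : Int) := by
    rw [pv_map_const _ _ (0 : Int) _ (fun x h1 h2 => by
      simp only [pvCell]; rw [if_pos (Or.inl (by omega))])]
    norm_num
  have hz3 : (PySem.List.pyRange (c + (m : Int) + 1) (height * 2 - 1) 1).map
      (pvCell height border_color fill_color border_width c (m : Int))
      = List.replicate (c - (m : Int)).toNat (0 : Int) := by
    rw [pv_map_const _ _ (0 : Int) _ (fun x h1 h2 => by
      simp only [pvCell]; rw [if_pos (Or.inr (by omega))])]
    congr 1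
    omega
  have hmid : (PySem.List.pyRange (c - (m : Int)) (c + (m : Int) + 1) 1).map
      (pvCell height border_color fill_color border_width c (m : Int))
      = if (m : Int) < border_width ∨ (m : Int) ≥ height - border_width then
          List.replicate (2 * (m : Int) + 1).toNat border_color
        else if (m : Int) = 0 then [border_color]
        else [border_color] ++ List.replicate (2 * (m : Int) - 1).toNat fill_color
              ++ [border_color] := by
    by_cases hb : (m : Int) < border_width ∨ (m : Int) ≥ height - border_width
    · rw [if_pos hb, pv_map_const _ _ border_color _ (fun x h1 h2 => by
        simp only [pvCell]
        rw [if_neg (by omega), if_pos hb])]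
      congr 1
      omega
    · rw [if_neg hb]
      by_cases hm0 : (m : Int) = 0
      · rw [if_pos hm0]
        have hx : c + (m : Int) + 1 = (c - (m : Int)) + 1 := by omega
        rw [hx, PySem.List.pyRange_one_singleton, List.map_singleton]
        simp only [pvCell]
        rw [if_neg (by omega), if_neg hb]
        simp
      · rw [if_neg hm0]
        have h1m : (1 : Int) ≤ (m : Int) := by omega
        rw [PySem.List.pyRange_one_append (c - (m : Int)) (c - (m : Int) + 1)
              (c + (m : Int) + 1) (by omega) (by omega),
            PySem.List.pyRange_one_append (c - (m : Int) + 1) (c + (m : Int))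
              (c + (m : Int) + 1) (by omega) (by omega),
            PySem.List.pyRange_one_singleton,
            show PySem.List.pyRange (c + (m : Int)) (c + (m : Int) + 1) 1
              = [c + (m : Int)] from PySem.List.pyRange_one_singleton _,
            List.map_append, List.map_append, List.map_singleton, List.map_singleton]
        have hcl : pvCell height border_color fill_color border_width c (m : Int)
            (c - (m : Int)) = border_color := by
          simp only [pvCell]
          rw [if_neg (by omega), if_neg (by omega)]
          simp
        have hcr : pvCell height border_color fill_color border_width c (m : Int)
            (c + (m : Int)) = border_color := by
          simp only [pvCell]
          rw [if_neg (by omega), if_neg (by omega)]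
          simp
        have hcm : (PySem.List.pyRange (c - (m : Int) + 1) (c + (m : Int)) 1).map
            (pvCell height border_color fill_color border_width c (m : Int))
            = List.replicate (2 * (m : Int) - 1).toNat fill_color := by
          rw [pv_map_const _ _ fill_color _ (fun x h1 h2 => by
            simp only [pvCell]
            rw [if_neg (by omega), if_neg (by omega), if_neg (by omega)])]
          congr 1
          omega
        rw [hcl, hcr, hcm]
        simp
  rw [hz1, hz3, hmid]
  simp only [pvB_row]
  simp

theorem draw_triangle_spec_aux (height border_color fill_color border_width : Int) :
    draw_triangle height border_color fill_color border_width
      = draw_triangle_alt height border_color fill_color border_width := by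
  unfold draw_triangle draw_triangle_alt
  dsimp only
  by_cases hle : height ≤ 0
  · simp [PySem.List.pyRange_one_eq_nil hle]
  · have hh : ((height.toNat : Nat) : Int) = height := Int.toNat_of_nonneg (by omega)
    rw [← hh, pv_outer_eq]
    simp only
    apply List.map_congr_left
    intro i hi
    have h0 : 0 ≤ i := (PySem.List.mem_pyRange_one.mp hi).1
    have hlt : i < ((height.toNat : Nat) : Int) := (PySem.List.mem_pyRange_one.mp hi).2
    have hti : ((i.toNat : Nat) : Int) = i := Int.toNat_of_nonneg h0
    rw [← hti, Int.toNat_natCast, pv_row_eq, pv_cell_row]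
    · exact pv_c_eq _
    · omega

-- ===== VERDICT (by name: the statement is the Claim_ definition above) =====
theorem draw_triangle_spec : Claim_equal_draw_triangle := by
  intro height border_color fill_color border_width _
  exact draw_triangle_spec_aux height border_color fill_color border_width
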